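-- pv_equiv track=rewrite | github.com/vagamens/cs260 | createFolders.py | buildHeader
-- ===== SOURCE A (Python) =====
-- def flatten(l):
-- 	newList = []
-- 	for i in range(len(l)):
-- 		if('list' in str(type(l[i]))):
-- 			temp = flatten(l[i])
-- 			for j in range(len(temp)):
-- 				newList.append(temp[j])
-- 		else:
-- 			newList.append(l[i])
-- 	return newList
--
-- def buildHeader(head):
-- 	header = []
-- 	header = head.split('{');
-- 	header = flatten(header)
-- 	newHead = []
-- 	for i in range(len(header)):
-- 		if('}' in header[i]):
-- 			newHead.append(flatten(header[i].split('}')))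
-- 		else:
-- 			newHead.append(header[i])
-- 	header = flatten(newHead)
-- 	return header
-- ===== SOURCE B (Python) =====
-- def buildHeader(head):
--     result = []
--     buf = []
--     for ch in head:
--         if ch == '{' or ch == '}':
--             result.append(''.join(buf))
--             buf = []
--         else:
--             buf.append(ch)
--     result.append(''.join(buf))
--     return result
-- ===== Notes on version B (the rewrite author's own statement) =====
-- stated objective: simpler
-- what changed: Replaced A's split-on-'{' / conditional split-on-'}' / two flatten passes with one linear character scan that cuts at either brace using a running buffer.
import Mathlib
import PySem

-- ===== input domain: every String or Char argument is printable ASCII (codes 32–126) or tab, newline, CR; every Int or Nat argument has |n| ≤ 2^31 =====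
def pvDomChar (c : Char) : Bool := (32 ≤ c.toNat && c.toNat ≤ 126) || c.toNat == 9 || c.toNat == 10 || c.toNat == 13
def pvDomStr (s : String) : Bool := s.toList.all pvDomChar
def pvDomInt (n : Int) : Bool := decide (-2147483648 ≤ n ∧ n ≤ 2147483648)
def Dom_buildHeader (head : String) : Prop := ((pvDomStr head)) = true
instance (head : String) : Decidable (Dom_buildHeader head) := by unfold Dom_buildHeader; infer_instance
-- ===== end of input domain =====

-- B replaces A's split-on-'{' / conditional split-on-'}' / flatten pipeline with a single
-- linear character scan cutting at either brace (objective: simpler); return values are equal.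

-- ===== PORT A =====
-- flatten applied to a list of strings: the 'list' branch never fires, so it copies element by element
def pvFlattenStr (l : List String) : List String :=
  l.foldl (fun acc s => acc ++ [s]) []

-- flatten applied to A's heterogeneous newHead (elements are str or list-of-str): one level of flattening
def pvFlattenSum (l : List (String ⊕ List String)) : List String :=
  l.foldl (fun acc e =>
    match e with
    | Sum.inl s => acc ++ [s]
    | Sum.inr t => acc ++ pvFlattenStr t) []

def buildHeader (head : String) : List String :=
  let header := pvFlattenStr ((PySem.Chars.splitOn head.toList ['{']).map String.ofList)
  let newHead := header.foldl (fun acc s =>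
      if PySem.Str.isIn "}" s then
        acc ++ [Sum.inr (pvFlattenStr ((PySem.Chars.splitOn s.toList ['}']).map String.ofList))]
      else acc ++ [Sum.inl s]) ([] : List (String ⊕ List String))
  pvFlattenSum newHead

-- ===== PORT B =====
def buildHeader_alt (head : String) : List String :=
  let r := head.toList.foldl (fun (p : List String × List Char) c =>
      if c = '{' ∨ c = '}' then (p.1 ++ [String.ofList p.2], [])
      else (p.1, p.2 ++ [c])) (([], []) : List String × List Char)
  r.1 ++ [String.ofList r.2]

-- ===== PRECONDITION & SPEC =====
def Spec_buildHeader (head : String) (out : List String) : Prop := out = buildHeader_alt head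
instance (head : String) (out : List String) : Decidable (Spec_buildHeader head out) := by unfold Spec_buildHeader; infer_instance

-- ===== CLAIM (what is proved, stated in full; the proofs are below) =====
def Claim_equal_buildHeader : Prop := ∀ (head : String), Dom_buildHeader head → Spec_buildHeader head (buildHeader head)

-- ===== LEMMAS AND PROOFS =====

-- splitting a char list on a single character (reference recursion for PySem.Chars.splitOn [c])
def split1 (c : Char) : List Char → List (List Char)
  | [] => [[]]
  | d :: ds => if d = c then [] :: split1 c ds else (split1 c ds).modifyHead (d :: ·)

-- splitting on either brace in one pass
def split2 : List Char → List (List Char)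
  | [] => [[]]
  | d :: ds => if d = '{' ∨ d = '}' then [] :: split2 ds else (split2 ds).modifyHead (d :: ·)

theorem split1_ne_nil (c : Char) (l : List Char) : split1 c l ≠ [] := by
  induction l with
  | nil => simp [split1]
  | cons d ds ih =>
    simp only [split1]
    split
    · simp
    · cases h : split1 c ds with
      | nil => exact absurd h ih
      | cons a t => simp

theorem split2_ne_nil (l : List Char) : split2 l ≠ [] := by
  induction l with
  | nil => simp [split2]
  | cons d ds ih =>
    simp only [split2]
    split
    · simp
    · cases h : split2 ds with
      | nil => exact absurd h ih
      | cons a t => simp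

theorem go_spec (c : Char) : ∀ (fuel : Nat) (l cur : List Char) (acc : List (List Char)),
    l.length < fuel →
    PySem.Chars.splitOn.go [c] fuel l cur acc =
      acc.reverse ++ (split1 c l).modifyHead (cur.reverse ++ ·) := by
  intro fuel
  induction fuel with
  | zero => intro l cur acc h; omega
  | succ f ih =>
    intro l cur acc h
    cases l with
    | nil => simp [PySem.Chars.splitOn.go, split1]
    | cons d rest =>
      rw [PySem.Chars.splitOn.go]
      by_cases hd : d = c
      · subst hd
        have hp : [d].isPrefixOf (d :: rest) = true := by simp [List.isPrefixOf]
        simp only [hp, if_pos, List.length_cons] at *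
        show PySem.Chars.splitOn.go [d] f rest [] (cur.reverse :: acc) = _
        rw [ih rest [] (cur.reverse :: acc) (by simpa using h)]
        simp [split1]
        cases split1 d rest <;> rfl
      · have hp : [c].isPrefixOf (d :: rest) = false := by
          simp [List.isPrefixOf]; exact fun h => hd h.symm
        simp only [hp, Bool.false_eq_true, if_false]
        rw [ih rest (d :: cur) acc (by simpa using Nat.lt_of_succ_lt_succ h)]
        simp only [split1, hd, if_false]
        cases hs : split1 c rest with
        | nil => exact absurd hs (split1_ne_nil c rest)
        | cons h t => simp [List.modifyHead]

theorem splitOn_eq_split1 (c : Char) (l : List Char) :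
    PySem.Chars.splitOn l [c] = split1 c l := by
  rw [PySem.Chars.splitOn, go_spec c (l.length + 1) l [] [] (by omega)]
  cases h : split1 c l with
  | nil => exact absurd h (split1_ne_nil c l)
  | cons a t => simp [List.modifyHead]

theorem split1_of_not_mem (c : Char) (l : List Char) (h : c ∉ l) : split1 c l = [l] := by
  induction l with
  | nil => simp [split1]
  | cons d ds ih =>
    simp only [List.mem_cons, not_or] at h
    have hdc : ¬ d = c := fun e => h.1 e.symm
    simp [split1, hdc, ih h.2, List.modifyHead]

theorem flatMap_split1_eq_split2 (l : List Char) :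
    (split1 '{' l).flatMap (split1 '}') = split2 l := by
  induction l with
  | nil => simp [split1, split2]
  | cons d ds ih =>
    by_cases hd : d = '{'
    · subst hd
      simp [split1, split2, ih]
    · cases hs : split1 '{' ds with
      | nil => exact absurd hs (split1_ne_nil '{' ds)
      | cons h t =>
        have hflat : split1 '}' h ++ t.flatMap (split1 '}') = split2 ds := by
          rw [← ih, hs]; simp
        by_cases hd2 : d = '}'
        · subst hd2
          simp only [split1, split2, hd, if_false, hs, List.modifyHead, or_true, if_true]
          simp [← hflat, split1]
        · simp only [split1, split2, hd, hd2, if_false, or_self, hs, List.modifyHead]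
          cases hh : split1 '}' h with
          | nil => exact absurd hh (split1_ne_nil '}' h)
          | cons a t2 =>
            rw [hh] at hflat
            simp only [List.flatMap_cons, split1, hd2, if_false, hh, List.modifyHead]
            rw [← hflat]
            simp

theorem foldB (cs : List Char) : ∀ (res : List String) (buf : List Char),
    (let r := cs.foldl (fun (p : List String × List Char) c =>
        if c = '{' ∨ c = '}' then (p.1 ++ [String.ofList p.2], [])
        else (p.1, p.2 ++ [c])) (res, buf)
     r.1 ++ [String.ofList r.2]) =
    res ++ ((split2 cs).modifyHead (buf ++ ·)).map String.ofList := by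
  induction cs with
  | nil => intro res buf; simp [split2, List.modifyHead]
  | cons c cs ih =>
    intro res buf
    by_cases hc : c = '{' ∨ c = '}'
    · simp only [List.foldl_cons, hc, if_true]
      rw [ih (res ++ [String.ofList buf]) []]
      simp only [split2, hc, if_true, List.modifyHead]
      cases h2 : split2 cs with
      | nil => exact absurd h2 (split2_ne_nil cs)
      | cons a t => simp
    · simp only [List.foldl_cons, hc, if_false]
      rw [ih res (buf ++ [c])]
      simp only [split2, hc, if_false]
      cases h2 : split2 cs with
      | nil => exact absurd h2 (split2_ne_nil cs)
      | cons a t => simp [List.modifyHead]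

theorem buildHeader_alt_eq (head : String) :
    buildHeader_alt head = (split2 head.toList).map String.ofList := by
  rw [buildHeader_alt, foldB head.toList [] []]
  cases h2 : split2 head.toList with
  | nil => exact absurd h2 (split2_ne_nil head.toList)
  | cons a t => simp [List.modifyHead]

theorem buildHeader_eq (head : String) :
    buildHeader head = ((split1 '{' head.toList).flatMap (split1 '}')).map String.ofList := by
  rw [buildHeader]
  simp only [pvFlattenStr, PySem.List.foldl_append_singleton, List.nil_append,
    splitOn_eq_split1]
  rw [show ∀ (l : List String) (acc : List (String ⊕ List String)),
      l.foldl (fun acc s =>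
        if PySem.Str.isIn "}" s then
          acc ++ [Sum.inr ((split1 '}' s.toList).map String.ofList)]
        else acc ++ [Sum.inl s]) acc =
      acc ++ l.map (fun s =>
        if PySem.Str.isIn "}" s then
          Sum.inr ((split1 '}' s.toList).map String.ofList)
        else Sum.inl s)
    from fun l => by
      induction l with
      | nil => simp
      | cons x xs ih =>
        intro acc
        rw [List.foldl_cons, ih, List.map_cons]
        split <;> simp]
  rw [List.nil_append]
  generalize split1 '{' head.toList = parts
  induction parts with
  | nil => simp [pvFlattenSum]
  | cons p ps ih =>
    have hstep : ∀ (l : List (String ⊕ List String)) (acc : List String),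
        l.foldl (fun acc e => match e with
          | Sum.inl s => acc ++ [s]
          | Sum.inr t => acc ++ pvFlattenStr t) acc =
        acc ++ l.foldl (fun acc e => match e with
          | Sum.inl s => acc ++ [s]
          | Sum.inr t => acc ++ pvFlattenStr t) [] := by
      intro l
      induction l with
      | nil => simp
      | cons x xs ihl =>
        intro acc
        cases x with
        | inl s =>
          simp only [List.foldl_cons, List.nil_append]
          rw [ihl (acc ++ [s]), ihl [s]]; simp
        | inr t =>
          simp only [List.foldl_cons, List.nil_append]
          rw [ihl (acc ++ pvFlattenStr t), ihl (pvFlattenStr t)]; simp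
    by_cases hp : PySem.Str.isIn "}" (String.ofList p)
    · simp only [List.map_cons, hp, if_true, pvFlattenSum, List.foldl_cons]
      rw [hstep]
      simp only [pvFlattenSum] at ih
      rw [ih]
      simp only [pvFlattenStr, PySem.List.foldl_append_singleton, List.nil_append,
        String.toList_ofList]
      simp
    · simp only [List.map_cons, hp, pvFlattenSum, List.foldl_cons]
      rw [hstep]
      simp only [pvFlattenSum] at ih
      rw [ih]
      have hmem : '}' ∉ p := by
        intro hm
        apply hp
        rw [PySem.Str.isIn_iff_infix]
        simp only [String.toList_ofList]
        exact (List.singleton_infix_iff '}' p).mpr hm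
      simp [split1_of_not_mem '}' p hmem]

-- ===== VERDICT (by name: the statement is the Claim_ definition above) =====
theorem buildHeader_spec : Claim_equal_buildHeader := by
  intro head _
  unfold Spec_buildHeader
  rw [buildHeader_eq, buildHeader_alt_eq, flatMap_split1_eq_split2]
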